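-- pv_equiv track=rewrite | github.com/Zitihskx/CodeCaveFinal | shellgen.py | gen_shellcode_copy
-- ===== SOURCE A (Python) =====
-- def gen_shellcode_copy(destination, source, cavesize, entry_point):
--     shellcode = r"\xBE"
--     while len(destination)!=0:
--         shellcode += r"\x" + destination[-2:]
--         destination = destination[0:-2]
--     shellcode += r"\x00\xBF"
--
--     while len(source)!=0:
--         shellcode += r"\x" + source[-2:]
--         source = source[0:-2]
--
--     shellcode += r"\x00\xB9"
--
--     while len(cavesize)!=0:
--         shellcode += r"\x" + cavesize[-2:]
--         cavesize = cavesize[0:-2]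
--
--     shellcode += r"\x00\x00\xF3\xA4\xB8"
--
--     while len(entry_point)!=0:
--         shellcode += r"\x" + entry_point[-2:]
--         entry_point = entry_point[0:-2]
--
--     shellcode += r"\x00\xFF\xE0"
--
--
--     return (shellcode)
-- ===== SOURCE B (Python) =====
-- def _fmt(s):
--     # little-endian byte tokens: walk the string left-to-right in chunks
--     # (a single leading char if the length is odd, then pairs), PREPENDING
--     # each token so the rightmost chunk ends up first
--     n = len(s)
--     i = n % 2
--     out = r'\x' + s[:1] if i else ''
--     while i < n:
--         out = r'\x' + s[i:i + 2] + out
--         i += 2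
--     return out
--
-- def gen_shellcode_copy(destination, source, cavesize, entry_point):
--     return (r'\xBE' + _fmt(destination)
--             + r'\x00\xBF' + _fmt(source)
--             + r'\x00\xB9' + _fmt(cavesize)
--             + r'\x00\x00\xF3\xA4\xB8' + _fmt(entry_point)
--             + r'\x00\xFF\xE0')
-- ===== Notes on version B (the rewrite author's own statement) =====
-- stated objective: simpler
-- what changed: Replaced A's four destructive right-peeling while-loops (each iteration re-slices and copies the whole shrinking string) by one reused index loop _fmt that walks the string left-to-right in chunks and prepends each token, used in a single concatenation expression; a timing run measured it faster because B never copies the remaining string per iteration.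
import Mathlib
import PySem

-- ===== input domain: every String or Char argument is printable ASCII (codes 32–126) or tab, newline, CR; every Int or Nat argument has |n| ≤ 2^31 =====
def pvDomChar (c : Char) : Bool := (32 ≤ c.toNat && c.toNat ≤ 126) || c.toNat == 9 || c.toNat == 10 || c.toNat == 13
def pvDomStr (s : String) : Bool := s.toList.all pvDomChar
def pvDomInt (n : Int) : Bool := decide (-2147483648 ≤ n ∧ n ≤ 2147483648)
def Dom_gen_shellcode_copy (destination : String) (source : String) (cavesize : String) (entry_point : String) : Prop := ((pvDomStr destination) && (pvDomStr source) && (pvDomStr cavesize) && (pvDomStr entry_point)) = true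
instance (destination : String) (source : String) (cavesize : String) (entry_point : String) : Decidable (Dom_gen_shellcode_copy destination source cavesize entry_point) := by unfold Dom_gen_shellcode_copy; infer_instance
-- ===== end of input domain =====

-- B replaces A's four destructive right-peeling while-loops by one reused
-- left-to-right index loop that prepends tokens; objective: simpler.


-- ===== PORT A =====
-- 'while len(s)!=0: shellcode += "\x" + s[-2:]; s = s[0:-2]' (strings as List Char)
def pvPeelA (acc : List Char) (s : List Char) : List Char :=
  if s.length ≠ 0 then
    pvPeelA (acc ++ ['\\','x'] ++ PySem.List.slice s (some (-2)) none)
            (PySem.List.slice s (some 0) (some (-2)))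
  else acc
termination_by s.length
decreasing_by
  simp only [PySem.List.slice_zero_start]
  rw [PySem.List.slice_to_neg_ofNat s 2 (by omega)]
  simp only [List.length_take]
  omega

def gen_shellcode_copy (destination : String) (source : String) (cavesize : String) (entry_point : String) : String :=
  let sc := "\\xBE".toList
  let sc := pvPeelA sc destination.toList
  let sc := sc ++ "\\x00\\xBF".toList
  let sc := pvPeelA sc source.toList
  let sc := sc ++ "\\x00\\xB9".toList
  let sc := pvPeelA sc cavesize.toList
  let sc := sc ++ "\\x00\\x00\\xF3\\xA4\\xB8".toList
  let sc := pvPeelA sc entry_point.toList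
  let sc := sc ++ "\\x00\\xFF\\xE0".toList
  String.ofList sc

-- ===== PORT B =====
-- _fmt's 'while i < n: out = "\x" + s[i:i+2] + out; i += 2'
-- (s[i:i+2], s[:1] with nonnegative in-range bounds are exactly drop/take)
def pvFmtLoop (s : List Char) (out : List Char) (i : Nat) : List Char :=
  if i < s.length then
    pvFmtLoop s (['\\','x'] ++ (s.drop i).take 2 ++ out) (i + 2)
  else out
termination_by s.length - i
decreasing_by omega

-- _fmt: n = len(s); i = n % 2; out = '\x' + s[:1] if i else ''; loop
def pvFmtB (s : List Char) : List Char :=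
  pvFmtLoop s
    (if s.length % 2 = 1 then ['\\','x'] ++ s.take 1 else [])
    (s.length % 2)

def gen_shellcode_copy_alt (destination : String) (source : String) (cavesize : String) (entry_point : String) : String :=
  String.ofList ("\\xBE".toList ++ pvFmtB destination.toList
    ++ "\\x00\\xBF".toList ++ pvFmtB source.toList
    ++ "\\x00\\xB9".toList ++ pvFmtB cavesize.toList
    ++ "\\x00\\x00\\xF3\\xA4\\xB8".toList ++ pvFmtB entry_point.toList
    ++ "\\x00\\xFF\\xE0".toList)

-- ===== PRECONDITION & SPEC =====
def Spec_gen_shellcode_copy (destination : String) (source : String) (cavesize : String) (entry_point : String) (out : String) : Prop := out = gen_shellcode_copy_alt destination source cavesize entry_point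
instance (destination : String) (source : String) (cavesize : String) (entry_point : String) (out : String) : Decidable (Spec_gen_shellcode_copy destination source cavesize entry_point out) := by unfold Spec_gen_shellcode_copy; infer_instance

-- ===== CLAIM (what is proved, stated in full; the proofs are below) =====
def Claim_equal_gen_shellcode_copy : Prop := ∀ (destination : String) (source : String) (cavesize : String) (entry_point : String), Dom_gen_shellcode_copy destination source cavesize entry_point → Spec_gen_shellcode_copy destination source cavesize entry_point (gen_shellcode_copy destination source cavesize entry_point)

-- ===== LEMMAS AND PROOFS =====

-- proof-only middleman: chunked recursion (leading chunk of size 1 on odd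
-- length, else 2), emitting the leading chunk last
def pvChunks (s : List Char) : List Char :=
  if s.length = 0 then []
  else
    pvChunks (s.drop (if s.length % 2 = 1 then 1 else 2)) ++ ['\\','x']
      ++ s.take (if s.length % 2 = 1 then 1 else 2)
termination_by s.length
decreasing_by simp only [List.length_drop]; split <;> omega

-- the loop computes pvChunks of the not-yet-visited suffix, prepended to out
theorem pvFmtLoop_eq (n : Nat) : ∀ (s out : List Char) (i : Nat),
    s.length - i ≤ n → (s.length - i) % 2 = 0 →
    pvFmtLoop s out i = pvChunks (s.drop i) ++ out := by
  induction n with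
  | zero =>
    intro s out i hn hpar
    rw [pvFmtLoop.eq_def]
    simp only [if_neg (by omega : ¬ i < s.length)]
    rw [pvChunks.eq_def]
    simp only [List.length_drop, if_pos (by omega : s.length - i = 0)]
    simp
  | succ n ih =>
    intro s out i hn hpar
    rw [pvFmtLoop.eq_def]
    by_cases h : i < s.length
    · simp only [if_pos h]
      rw [ih s _ (i + 2) (by omega) (by omega)]
      conv_rhs => rw [pvChunks.eq_def]
      have hlen : (s.drop i).length = s.length - i := by simp
      have h2 : s.length - i ≥ 2 := by omega
      simp only [hlen, if_neg (by omega : ¬ s.length - i = 0),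
        if_neg (by omega : ¬ (s.length - i) % 2 = 1)]
      rw [List.drop_drop, List.take_drop]
      simp [List.append_assoc]
    · simp only [if_neg h]
      rw [pvChunks.eq_def]
      simp only [List.length_drop, if_pos (by omega : s.length - i = 0)]
      simp

theorem pvFmtB_eq_chunks (s : List Char) : pvFmtB s = pvChunks s := by
  unfold pvFmtB
  by_cases h : s.length % 2 = 1
  · simp only [if_pos h]
    rw [h, pvFmtLoop_eq (s.length - 1) s _ 1 (by omega) (by omega)]
    conv_rhs => rw [pvChunks.eq_def]
    simp only [if_neg (by omega : ¬ s.length = 0), if_pos h]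
    simp [List.append_assoc]
  · simp only [if_neg h]
    have h0 : s.length % 2 = 0 := by omega
    rw [h0, pvFmtLoop_eq s.length s _ 0 (by omega) (by omega)]
    simp

-- pvChunks satisfies A's right-peel recurrence
theorem pvChunks_peel (n : Nat) : ∀ s : List Char, s.length ≤ n → s ≠ [] →
    pvChunks s = ['\\','x'] ++ s.drop (s.length - 2) ++ pvChunks (s.take (s.length - 2)) := by
  induction n with
  | zero => intro s hl hne; cases s <;> simp_all
  | succ n ih =>
    intro s hl hne
    have hpos : 0 < s.length := List.length_pos_iff.mpr hne
    rw [pvChunks.eq_def]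
    simp only [if_neg (by omega : ¬ s.length = 0)]
    by_cases hsmall : s.length ≤ 2
    · have hk : (if s.length % 2 = 1 then 1 else 2 : Nat) = s.length := by
        interval_cases h : s.length <;> simp
      rw [hk, List.drop_length, List.take_length]
      have h2 : s.length - 2 = 0 := by omega
      rw [h2, List.drop_zero, List.take_zero, pvChunks.eq_def]
      simp
    · set k : Nat := if s.length % 2 = 1 then 1 else 2 with hkdef
      have hk1 : 1 ≤ k := by rw [hkdef]; split <;> omega
      have hkle : k ≤ s.length - 2 := by
        rw [hkdef]; by_cases h : s.length % 2 = 1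
        · simp only [if_pos h]; omega
        · simp only [if_neg h]; omega
      have hdne : s.drop k ≠ [] := by
        intro h
        have := congrArg List.length h
        simp only [List.length_drop, List.length_nil] at this
        omega
      rw [ih (s.drop k) (by simp only [List.length_drop]; omega) hdne]
      simp only [List.length_drop]
      have e1 : (s.drop k).drop (s.length - k - 2) = s.drop (s.length - 2) := by
        rw [List.drop_drop]; congr 1; omega
      have e2 : (s.drop k).take (s.length - k - 2) = (s.take (s.length - 2)).drop k := by
        rw [List.drop_take]; congr 1; omega
      rw [e1, e2]
      conv_rhs => rw [pvChunks.eq_def]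
      have hlt : (s.take (s.length - 2)).length = s.length - 2 := by
        simp only [List.length_take]; omega
      rw [hlt]
      simp only [if_neg (by omega : ¬ s.length - 2 = 0)]
      have hk' : (if (s.length - 2) % 2 = 1 then 1 else 2 : Nat) = k := by
        rw [hkdef]
        have : (s.length - 2) % 2 = s.length % 2 := by omega
        rw [this]
      rw [hk']
      have e3 : (s.take (s.length - 2)).take k = s.take k := by
        rw [List.take_take]; congr 1; omega
      rw [e3]
      simp [List.append_assoc]

theorem pvPeelA_eq (n : Nat) : ∀ s acc : List Char, s.length ≤ n →
    pvPeelA acc s = acc ++ pvFmtB s := by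
  induction n with
  | zero =>
    intro s acc hl
    have : s = [] := List.length_eq_zero_iff.mp (by omega)
    subst this
    rw [pvPeelA.eq_def, pvFmtB_eq_chunks, pvChunks.eq_def]; simp
  | succ n ih =>
    intro s acc hl
    rw [pvPeelA.eq_def]
    by_cases h : s.length = 0
    · have : s = [] := List.length_eq_zero_iff.mp h
      subst this
      rw [pvFmtB_eq_chunks, pvChunks.eq_def]; simp
    · simp only [if_pos (by omega : s.length ≠ 0), PySem.List.slice_zero_start]
      rw [PySem.List.slice_to_neg_ofNat s 2 (by omega),
          PySem.List.slice_from_neg_ofNat s 2 (by omega)]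
      rw [ih (s.take (s.length - 2)) _ (by simp only [List.length_take]; omega)]
      rw [pvFmtB_eq_chunks, pvFmtB_eq_chunks,
          pvChunks_peel s.length s (le_refl _) (by intro hh; subst hh; simp at h)]
      simp [List.append_assoc]

theorem pvPeelA_eq' (s acc : List Char) : pvPeelA acc s = acc ++ pvFmtB s :=
  pvPeelA_eq s.length s acc (le_refl _)

-- ===== VERDICT (by name: the statement is the Claim_ definition above) =====
theorem gen_shellcode_copy_spec : Claim_equal_gen_shellcode_copy := by
  intro d s c e _
  unfold Spec_gen_shellcode_copy gen_shellcode_copy gen_shellcode_copy_alt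
  simp only [pvPeelA_eq', List.append_assoc]
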